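-- pv_equiv track=rewrite | github.com/ryougishiki02/AI-STEM | image/strain/pkg.py | classify_atoms
-- ===== SOURCE A (Python) =====
-- from collections import defaultdict,Counter
--
-- def classify_atoms(label_list):
--     """
--     对原子根据其标签列表进行分类
--
--     参数:
--     - label_list: 每个原子的标签列表 [[labels_atom1], [labels_atom2], ...]
--
--     返回:
--     - 每个原子的分类标签列表 ['A', 'B', 'A', ...]
--     """
--     # 将每个原子的标签列表排序，并转为 tuple 作为特征 key
--     key_list = [tuple(sorted(atom)) for atom in label_list]
--
--     # 建立 key -> indices 的映射
--     key_to_indices = defaultdict(list)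
--     for i, key in enumerate(key_list):
--         key_to_indices[key].append(i)
--
--     # 按出现频率排序（频率高的在前）
--     sorted_keys = sorted(key_to_indices.items(), key=lambda x: len(x[1]), reverse=True)
--
--     # 初始化分类字典
--     most_common_key = sorted_keys[0][0]
--     classified = {most_common_key: 'A'}
--     seen_labels = set(most_common_key)
--
--     # 用于存储每个符号对应的元素集合
--     symbol_map = {}
--     label_counter = ord('B')
--
--     # 处理其余的key
--     for key, _ in sorted_keys[1:]:
--         key_set = set(key)
--
--         # 判断是否为新类别
--         if key_set <= seen_labels:
--             # 完全是已见过的标签，归为 A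
--             classified[key] = 'A'
--         else:
--             # 检查是否与已有 symbol 产生交集
--             matched = False
--             for symbol, elements in symbol_map.items():
--                 if key_set & elements:  # 有交集
--                     classified[key] = symbol
--                     matched = True
--                     break
--
--             if not matched:
--                 # 创建新的分类标签
--                 label = chr(label_counter)
--                 classified[key] = label
--                 symbol_map[label] = key_set
--                 label_counter += 1
--
--             # 更新已见过的标签集合
--             seen_labels.update(key_set)
--
--     # 返回每个原子的分类标签
--     return [classified[key] for key in key_list]
-- ===== SOURCE B (Python) =====
-- from collections import Counter
--
-- def classify_atoms(label_list):
--     # Staged and stateless: one scan builds prefix label-unions, one small fold extracts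
--     # the (pairwise disjoint) founder sets, and each key's letter is then computed by a
--     # closed formula -- 'A' if covered by its prefix union, else the first founder it hits.
--     keys = [tuple(sorted(atom)) for atom in label_list]
--     if not keys:
--         return []
--     cnt = Counter(keys)
--     order = sorted(cnt, key=lambda k: cnt[k], reverse=True)
--     sets = [set(k) for k in order]
--     prefix = []            # prefix[i] = labels appearing strictly before position i
--     u = set()
--     for s in sets:
--         prefix.append(u)
--         u = u | s
--     founders = []          # founding label sets, pairwise disjoint, in creation order
--     for s, p in zip(sets[1:], prefix[1:]):
--         if not s <= p and all(not (s & f) for f in founders):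
--             founders.append(s)
--     def label(s, p):
--         if s <= p:
--             return 'A'
--         hits = [j for j, f in enumerate(founders) if s & f]
--         return chr(66 + hits[0])
--     classified = {order[0]: 'A'}
--     for k, s, p in zip(order[1:], sets[1:], prefix[1:]):
--         classified[k] = label(s, p)
--     return [classified[k] for k in keys]
-- ===== Notes on version B (the rewrite author's own statement) =====
-- stated objective: alternative
-- what changed: A classifies in one stateful sweep that mutates classified/seen_labels/symbol_map/label_counter and scans all symbol sets per key; B is staged and stateless: it builds the prefix label-unions, extracts the pairwise-disjoint founder sets in a separate fold, and then labels every key independently by a closed formula ('A' if covered by its prefix union, else the first founder it intersects) - correct because later founders are disjoint from earlier ones, so the first hit over ALL founders equals A's first hit over the founders existing at processing time.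
import Mathlib
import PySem

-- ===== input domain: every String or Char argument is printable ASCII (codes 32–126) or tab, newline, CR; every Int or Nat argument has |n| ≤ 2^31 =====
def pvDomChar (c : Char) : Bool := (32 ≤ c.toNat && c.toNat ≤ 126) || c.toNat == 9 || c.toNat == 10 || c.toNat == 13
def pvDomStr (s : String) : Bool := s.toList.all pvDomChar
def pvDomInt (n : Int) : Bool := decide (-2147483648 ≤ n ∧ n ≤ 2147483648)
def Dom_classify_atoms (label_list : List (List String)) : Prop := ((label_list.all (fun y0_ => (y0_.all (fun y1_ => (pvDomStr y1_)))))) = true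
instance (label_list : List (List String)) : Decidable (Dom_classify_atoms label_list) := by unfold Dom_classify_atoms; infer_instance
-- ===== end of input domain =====

-- B replaces A's stateful sweep (mutating classified/seen/symbol_map while scanning) by
-- staged, stateless passes: prefix label-unions, then the disjoint founder sets, then a
-- per-key closed formula ('A' if covered by its prefix union, else the first founder hit).

-- chr(n), used by both Pythons: exact for valid Unicode scalar values (all codes reachable
-- without ≥ 55230 distinct symbol classes); surrogate code points cannot live in a Lean
-- String, so beyond them an injective '?'-run placeholder of length n+2 is used.
def pyChr (n : Nat) : String :=
  if n.isValidChar then String.ofList [Char.ofNat n] else String.ofList (List.replicate (n + 2) '?')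

-- ===== PORT A =====
-- state: (classified, seen_labels, symbol_map, label_counter)
def StA : Type := PySem.Dict (List String) String × PySem.Set String × PySem.Dict String (PySem.Set String) × Nat

-- one iteration of A's 'for key, _ in sorted_keys[1:]' loop (body transcribed in order)
def stepA (st : StA) (key : List String) : StA :=
  let classified := st.1
  let seen_labels := st.2.1
  let symbol_map := st.2.2.1
  let label_counter := st.2.2.2
  let key_set := PySem.Set.ofList key
  if PySem.Set.issubset key_set seen_labels then
    (classified.insert key "A", seen_labels, symbol_map, label_counter)
  else
    -- 'for symbol, elements in symbol_map.items(): if key_set & elements: …; break' = find?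
    match symbol_map.items.find? (fun se => decide (PySem.Set.inter key_set se.2 ≠ [])) with
    | some se =>
        (classified.insert key se.1, PySem.Set.update seen_labels key_set, symbol_map, label_counter)
    | none =>
        let label := pyChr label_counter
        (classified.insert key label, PySem.Set.update seen_labels key_set,
         symbol_map.insert label key_set, label_counter + 1)

def classify_atoms (label_list : List (List String)) : List String :=
  let key_list := label_list.map (fun atom => PySem.List.sorted atom (fun x => x) false)
  let key_to_indices : PySem.Dict (List String) (List Int) :=
    (PySem.List.enumerate key_list).foldl
      (fun d p => d.modify p.2 [] (fun v => v ++ [p.1])) PySem.Dict.empty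
  let sorted_keys := PySem.List.sorted key_to_indices.items (fun x => ((x.2.length : Int))) true
  match sorted_keys with
  | [] => []  -- Python raises IndexError at sorted_keys[0]; excluded by Pre_
  | (most_common_key, _) :: rest =>
    let st := rest.foldl (fun st kp => stepA st kp.1)
      ((PySem.Dict.empty : PySem.Dict (List String) String).insert most_common_key "A",
       PySem.Set.ofList most_common_key, PySem.Dict.empty, 66)
    key_list.map (fun k => st.1.getD k "")

-- ===== PORT B =====
-- label(s, p): 'A' if s <= p, else chr(66 + [j for j, f in enumerate(founders) if s & f][0])
def pvLabelB (founders : List (PySem.Set String)) (s p : PySem.Set String) : String :=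
  if PySem.Set.issubset s p then "A"
  else
    let hits := (PySem.List.enumerate founders).filterMap
      (fun jf => if PySem.Set.inter s jf.2 ≠ [] then some jf.1 else none)
    match hits with
    | [] => ""                       -- hits[0] would raise IndexError; never reached
    | j :: _ => pyChr (66 + j).toNat -- enumerate indices are ≥ 0, so toNat is exact

def classify_atoms_alt (label_list : List (List String)) : List String :=
  let keys := label_list.map (fun atom => PySem.List.sorted atom (fun x => x) false)
  if keys.isEmpty then [] else
  let cnt := PySem.Dict.counter keys
  let order := PySem.List.sorted cnt.keys (fun k => cnt.getD k 0) true
  let sets := order.map (fun k => PySem.Set.ofList k)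
  -- 'for s in sets: prefix.append(u); u = u | s'
  let prefixes := (sets.foldl
      (fun (pu : List (PySem.Set String) × PySem.Set String) s =>
        (pu.1 ++ [pu.2], PySem.Set.update pu.2 s))
      ([], PySem.Set.empty)).1
  -- 'for s, p in zip(sets[1:], prefix[1:]): if not s <= p and all(not (s & f) …): founders.append(s)'
  let founders := ((sets.drop 1).zip (prefixes.drop 1)).foldl
      (fun F sp =>
        if !PySem.Set.issubset sp.1 sp.2 && F.all (fun f => PySem.Set.inter sp.1 f == []) then
          F ++ [sp.1] else F) []
  match order with
  | [] => []              -- unreachable: keys is nonempty here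
  | k0 :: ordt =>
    -- 'classified = {order[0]: 'A'}; for k, s, p in zip(order[1:], sets[1:], prefix[1:]): …'
    let classified := (ordt.zip ((sets.drop 1).zip (prefixes.drop 1))).foldl
      (fun d ksp => d.insert ksp.1 (pvLabelB founders ksp.2.1 ksp.2.2))
      ((PySem.Dict.empty : PySem.Dict (List String) String).insert k0 "A")
    keys.map (fun k => classified.getD k "")

-- ===== PRECONDITION & SPEC =====
-- Pre_ excludes only the empty list, on which A raises IndexError (sorted_keys[0]).
def Pre_classify_atoms (label_list : List (List String)) : Prop := label_list ≠ []
instance (label_list : List (List String)) : Decidable (Pre_classify_atoms label_list) := by unfold Pre_classify_atoms; infer_instance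
def pvWitness_classify_atoms : List (List String) := [["H"], ["H", "O"]]

def Spec_classify_atoms (label_list : List (List String)) (out : List String) : Prop := out = classify_atoms_alt label_list
instance (label_list : List (List String)) (out : List String) : Decidable (Spec_classify_atoms label_list out) := by unfold Spec_classify_atoms; infer_instance

-- ===== CLAIM (what is proved, stated in full; the proofs are below) =====
def Claim_equal_classify_atoms : Prop := ∀ (label_list : List (List String)), Dom_classify_atoms label_list → Pre_classify_atoms label_list → Spec_classify_atoms label_list (classify_atoms label_list)

-- ===== LEMMAS AND PROOFS =====


-- sorted of a mapped list (reverse=True), by the foldl/insertBy characterisation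
theorem insertBy_map {α β : Type} (F : α → β) (p : β → β → Bool) (x : α) (ys : List α) :
    PySem.List.insertBy p (F x) (ys.map F) =
      (PySem.List.insertBy (fun a b => p (F a) (F b)) x ys).map F := by
  induction ys with
  | nil => simp [PySem.List.insertBy]
  | cons y t ih =>
    simp only [List.map_cons, PySem.List.insertBy]
    by_cases hb : p (F x) (F y) <;> simp [hb, ih]

theorem foldl_insertBy_map {α β : Type} (F : α → β) (p : β → β → Bool) (xs ys : List α) :
    (xs.map F).foldl (fun acc x => PySem.List.insertBy p x acc) (ys.map F) =
      (xs.foldl (fun acc x => PySem.List.insertBy (fun a b => p (F a) (F b)) x acc) ys).map F := by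
  induction xs generalizing ys with
  | nil => simp
  | cons x t ih =>
    simp only [List.map_cons, List.foldl_cons, insertBy_map]
    exact ih _

theorem sorted_map_rev {α β κ : Type} [LT κ] [DecidableLT κ] (xs : List α) (F : α → β) (g : β → κ) :
    PySem.List.sorted (xs.map F) g true = (PySem.List.sorted xs (fun a => g (F a)) true).map F := by
  rw [PySem.List.sorted_rev_eq_foldl_insertBy, PySem.List.sorted_rev_eq_foldl_insertBy]
  have h := foldl_insertBy_map F (fun a b => decide (g b < g a)) xs []
  simpa using h

theorem pyChr_injective : Function.Injective pyChr := by
  intro a b h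
  unfold pyChr at h
  split_ifs at h with ha hb hb
  · have := congrArg String.toList h
    simp at this
    have := congrArg Char.toNat this
    rwa [Char.toNat_ofNat, Char.toNat_ofNat, if_pos ha, if_pos hb] at this
  · have := congrArg (fun s => s.toList.length) h; simp at this
  · have := congrArg (fun s => s.toList.length) h; simp at this
  · have := congrArg (fun s => s.toList.length) h; simp at this; omega

theorem ofList_nodup_self {s : List String} (h : s.Nodup) : PySem.Set.ofList s = s := by
  rw [← PySem.Set.update_nil_left,
    PySem.Set.update_eq_append_of_disjoint ([] : PySem.Set String) s h (by simp)]
  simp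

theorem update_of_subset {s p : PySem.Set String} (h : PySem.Set.issubset s p = true) :
    PySem.Set.update p s = p := by
  rw [PySem.Set.update_eq_append_filter]
  have hnil : (PySem.Set.ofList s).filter (fun y => !PySem.Set.contains p y) = [] := by
    rw [List.filter_eq_nil_iff]
    intro y hy
    have : y ∈ p := (PySem.Set.issubset_iff _ _).mp h y ((PySem.Set.mem_ofList _ _).mp hy)
    simp [this]
  rw [hnil]
  simp

theorem s_ne_nil_of_not_subset {s p : PySem.Set String} (h : ¬ PySem.Set.issubset s p = true) :
    s ≠ [] := by
  rintro rfl
  exact h ((PySem.Set.issubset_iff _ _).mpr (by simp))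

-- B's prefix-union scan, recursively
def prefixScan (u : PySem.Set String) : List (PySem.Set String) → List (PySem.Set String)
  | [] => []
  | s :: t => u :: prefixScan (PySem.Set.update u s) t

theorem prefix_fold (sets : List (PySem.Set String)) :
    ∀ (acc : List (PySem.Set String)) (u : PySem.Set String),
    (sets.foldl
      (fun (pu : List (PySem.Set String) × PySem.Set String) s =>
        (pu.1 ++ [pu.2], PySem.Set.update pu.2 s)) (acc, u)).1 = acc ++ prefixScan u sets := by
  induction sets with
  | nil => intro acc u; simp [prefixScan]
  | cons s t ih => intro acc u; simp [prefixScan, ih]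

-- B's founder extraction, recursively over the raw keys
def foldF (u : PySem.Set String) (F : List (PySem.Set String)) :
    List (List String) → List (PySem.Set String)
  | [] => F
  | k :: t =>
    foldF (PySem.Set.update u (PySem.Set.ofList k))
      (if !PySem.Set.issubset (PySem.Set.ofList k) u &&
          F.all (fun f => PySem.Set.inter (PySem.Set.ofList k) f == []) then
        F ++ [PySem.Set.ofList k] else F) t

theorem founders_fold (l : List (List String)) :
    ∀ (u : PySem.Set String) (F : List (PySem.Set String)),
    (((l.map PySem.Set.ofList)).zip (prefixScan u (l.map PySem.Set.ofList))).foldl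
      (fun F sp =>
        if !PySem.Set.issubset sp.1 sp.2 && F.all (fun f => PySem.Set.inter sp.1 f == []) then
          F ++ [sp.1] else F) F = foldF u F l := by
  induction l with
  | nil => intro u F; simp [foldF]
  | cons k t ih => intro u F; simp only [List.map_cons, prefixScan, List.zip_cons_cons, List.foldl_cons, foldF]; exact ih _ _

theorem foldF_prefix (l : List (List String)) :
    ∀ (u : PySem.Set String) (F : List (PySem.Set String)),
    ∃ G, foldF u F l = F ++ G := by
  induction l with
  | nil => intro u F; exact ⟨[], by simp [foldF]⟩
  | cons k t ih =>
    intro u F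
    simp only [foldF]
    split
    · obtain ⟨G, hG⟩ := ih (PySem.Set.update u (PySem.Set.ofList k)) (F ++ [PySem.Set.ofList k])
      exact ⟨[PySem.Set.ofList k] ++ G, by rw [hG, List.append_assoc]⟩
    · exact ih _ _

-- B's classification loop, recursively over the raw keys
def foldD (Ffin : List (PySem.Set String)) (u : PySem.Set String)
    (d : PySem.Dict (List String) String) : List (List String) → PySem.Dict (List String) String
  | [] => d
  | k :: t => foldD Ffin (PySem.Set.update u (PySem.Set.ofList k))
      (d.insert k (pvLabelB Ffin (PySem.Set.ofList k) u)) t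

theorem classified_fold (Ffin : List (PySem.Set String)) (l : List (List String)) :
    ∀ (u : PySem.Set String) (d : PySem.Dict (List String) String),
    (l.zip ((l.map PySem.Set.ofList).zip (prefixScan u (l.map PySem.Set.ofList)))).foldl
      (fun d ksp => d.insert ksp.1 (pvLabelB Ffin ksp.2.1 ksp.2.2)) d = foldD Ffin u d l := by
  induction l with
  | nil => intro u d; simp [foldD]
  | cons k t ih => intro u d; simp only [List.map_cons, prefixScan, List.zip_cons_cons, List.foldl_cons, foldD]; exact ih _ _

-- head of the hit-index list [j for j, f in enumerate(F) if s & f]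
theorem hits_first (s : PySem.Set String) :
    ∀ (F : List (PySem.Set String)) (st : Int) (j : Nat) (hj : j < F.length),
    PySem.Set.inter s (F[j]) ≠ [] →
    (∀ i (h : i < j), PySem.Set.inter s (F[i]'(h.trans hj)) = []) →
    ∃ rest, (PySem.List.enumerate F st).filterMap
        (fun jf => if PySem.Set.inter s jf.2 ≠ [] then some jf.1 else none)
      = (st + (j : Int)) :: rest := by
  intro F
  induction F with
  | nil => intro st j hj; simp at hj
  | cons x t ih =>
    intro st j hj hq hbef
    rw [PySem.List.enumerate_cons]
    by_cases hx : PySem.Set.inter s x = []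
    · have hj0 : j ≠ 0 := by
        rintro rfl
        exact hq (by simpa using hx)
      obtain ⟨j', rfl⟩ : ∃ j', j = j' + 1 := ⟨j - 1, by omega⟩
      have hj' : j' < t.length := by simpa using hj
      obtain ⟨rest, hr⟩ := ih (st + 1) j' hj' (by simpa using hq)
        (fun i hi => by simpa using hbef (i + 1) (by omega))
      refine ⟨rest, ?_⟩
      rw [List.filterMap_cons]
      simp only [hx, ne_eq, not_true_eq_false, if_false]
      rw [hr]
      congr 1
      push_cast
      ring
    · have hj0 : j = 0 := by
        by_contra h0
        exact hx (by simpa using hbef 0 (Nat.pos_of_ne_zero h0))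
      subst hj0
      refine ⟨(PySem.List.enumerate t (st + 1)).filterMap
        (fun jf => if PySem.Set.inter s jf.2 ≠ [] then some jf.1 else none), ?_⟩
      rw [List.filterMap_cons]
      simp [hx]


-- A's stateful loop, tracked against B's stateless classification:
-- with symbol_map = the founders so far (named chr(66+i)) and counter = 66 + #founders,
-- A's classified dict develops exactly as foldD with the FINAL founder list.
theorem mainA (l : List (List String)) :
    ∀ (d : PySem.Dict (List String) String) (u : PySem.Set String)
      (F : List (PySem.Set String)) (sym : PySem.Dict String (PySem.Set String))
      (Ffin : List (PySem.Set String)),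
    sym.items = F.mapIdx (fun i s => (pyChr (66 + i), s)) →
    Ffin = foldF u F l →
    (l.foldl stepA (d, u, sym, 66 + F.length)).1 = foldD Ffin u d l := by
  induction l with
  | nil => intro d u F sym Ffin _ _; simp [foldD]
  | cons k t ih =>
    intro d u F sym Ffin hsym hFfin
    simp only [List.foldl_cons, foldD, foldF] at hFfin ⊢
    by_cases hs : PySem.Set.issubset (PySem.Set.ofList k) u = true
    · -- covered by the prefix union: both sides label 'A', state otherwise unchanged
      have hstep : stepA (d, u, sym, 66 + F.length) k =
          (d.insert k "A", u, sym, 66 + F.length) := by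
        simp only [stepA]; rw [if_pos hs]
      have hlab : pvLabelB Ffin (PySem.Set.ofList k) u = "A" := by
        simp only [pvLabelB]; rw [if_pos hs]
      rw [hstep, hlab, update_of_subset hs]
      simp only [hs, Bool.not_true, Bool.false_and, Bool.false_eq_true, if_false,
        update_of_subset hs] at hFfin
      exact ih (d.insert k "A") u F sym Ffin hsym hFfin
    · rcases hf : sym.items.find?
          (fun se => decide (PySem.Set.inter (PySem.Set.ofList k) se.2 ≠ [])) with _ | se
      · -- no existing founder intersects: A creates a new symbol, B's key founds itself
        have hnone : ∀ (i : Nat) (hi : i < F.length),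
            PySem.Set.inter (PySem.Set.ofList k) (F[i]) = [] := by
          intro i hi
          have hmem : (pyChr (66 + i), F[i]) ∈ sym.items := by
            rw [hsym]
            exact List.mem_iff_getElem.mpr ⟨i, by simp [hi], by simp [List.getElem_mapIdx]⟩
          have := List.find?_eq_none.mp hf _ hmem
          simpa using this
        have hall : F.all (fun f => PySem.Set.inter (PySem.Set.ofList k) f == []) = true := by
          rw [List.all_eq_true]
          intro f hfF
          obtain ⟨i, hi, rfl⟩ := List.mem_iff_getElem.mp hfF
          simp [hnone i hi]
        have hs' : PySem.Set.issubset (PySem.Set.ofList k) u = false := eq_false_of_ne_true hs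
        rw [hs', hall] at hFfin
        simp only [Bool.not_false, Bool.true_and, if_true] at hFfin
        have hstep : stepA (d, u, sym, 66 + F.length) k =
            (d.insert k (pyChr (66 + F.length)),
             PySem.Set.update u (PySem.Set.ofList k),
             sym.insert (pyChr (66 + F.length)) (PySem.Set.ofList k),
             66 + F.length + 1) := by
          simp only [stepA]; rw [if_neg hs, hf]
        have hnc : sym.contains (pyChr (66 + F.length)) = false := by
          by_contra hc
          rw [Bool.not_eq_false] at hc
          have hmemk := (PySem.Dict.contains_iff_mem_keys _ _).mp hc
          simp only [PySem.Dict.keys, hsym] at hmemk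
          obtain ⟨p, hp, hp1⟩ := List.mem_map.mp hmemk
          obtain ⟨i, hi, hpe⟩ := List.mem_iff_getElem.mp hp
          rw [List.getElem_mapIdx] at hpe
          rw [← hpe] at hp1
          have := pyChr_injective hp1
          rw [List.length_mapIdx] at hi
          omega
        have hsym' : (sym.insert (pyChr (66 + F.length)) (PySem.Set.ofList k)).items =
            (F ++ [PySem.Set.ofList k]).mapIdx (fun i s => (pyChr (66 + i), s)) := by
          rw [PySem.Dict.items_insert_of_not_contains _ _ hnc, hsym, List.mapIdx_append]
          simp
        obtain ⟨G, hG⟩ := foldF_prefix t (PySem.Set.update u (PySem.Set.ofList k))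
          (F ++ [PySem.Set.ofList k])
        rw [hG] at hFfin
        have hsnn : PySem.Set.ofList k ≠ [] := s_ne_nil_of_not_subset hs
        have hlab : pvLabelB Ffin (PySem.Set.ofList k) u = pyChr (66 + F.length) := by
          simp only [pvLabelB]
          rw [if_neg hs]
          have hjl : F.length < Ffin.length := by simp [hFfin]
          have hFj : Ffin[F.length]'hjl = PySem.Set.ofList k := by
            rw [List.getElem_of_eq hFfin]
            rw [List.getElem_append_left (by simp)]
            rw [List.getElem_append_right (by simp)]
            simp
          obtain ⟨y, hy⟩ := List.exists_mem_of_ne_nil _ hsnn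
          have hq : PySem.Set.inter (PySem.Set.ofList k) (Ffin[F.length]'hjl) ≠ [] := by
            rw [hFj]
            exact List.ne_nil_of_mem ((PySem.Set.mem_inter _ _ _).mpr ⟨hy, hy⟩)
          have hbef : ∀ (i : Nat) (h : i < F.length),
              PySem.Set.inter (PySem.Set.ofList k) (Ffin[i]'(h.trans hjl)) = [] := by
            intro i hilt
            have hFi : Ffin[i]'(hilt.trans hjl) = F[i] := by
              rw [List.getElem_of_eq hFfin]
              rw [List.getElem_append_left (by simp; omega)]
              rw [List.getElem_append_left hilt]
            rw [hFi]
            exact hnone i hilt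
          obtain ⟨rest, hr⟩ := hits_first (PySem.Set.ofList k) Ffin 0 F.length hjl hq hbef
          rw [hr]
          have heq : ((66 : Int) + (0 + (F.length : Int))).toNat = 66 + F.length := by omega
          show pyChr ((66 + (0 + (F.length : Int))).toNat) = pyChr (66 + F.length)
          rw [heq]
        rw [hstep, hlab]
        have := ih (d.insert k (pyChr (66 + F.length)))
          (PySem.Set.update u (PySem.Set.ofList k)) (F ++ [PySem.Set.ofList k])
          (sym.insert (pyChr (66 + F.length)) (PySem.Set.ofList k)) Ffin hsym'
          (hFfin.trans hG.symm)
        simpa using this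
      · -- some founder intersects: both sides pick the first (least-index) one
        obtain ⟨hpred, as, bs, hsplit, hbefore⟩ := List.find?_eq_some_iff_append.mp hf
        rw [hsym] at hsplit
        have hlens := congrArg List.length hsplit
        simp only [List.length_mapIdx, List.length_append, List.length_cons] at hlens
        have hjlt : as.length < F.length := by omega
        have hse : se = (pyChr (66 + as.length), F[as.length]) := by
          have h1 : (F.mapIdx (fun i s => (pyChr (66 + i), s)))[as.length]'(by simp [hjlt]) =
              (as ++ se :: bs)[as.length]'(by simp) := List.getElem_of_eq hsplit _
          rw [List.getElem_append_right (le_refl _)] at h1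
          simp only [List.getElem_mapIdx, Nat.sub_self, List.getElem_cons_zero] at h1
          exact h1.symm
        have hhit : PySem.Set.inter (PySem.Set.ofList k) (F[as.length]) ≠ [] := by
          rw [hse] at hpred
          simpa using hpred
        have hmin : ∀ (i : Nat) (hi : i < as.length),
            PySem.Set.inter (PySem.Set.ofList k) (F[i]'(hi.trans hjlt)) = [] := by
          intro i hi
          have hasi : as[i]'(by omega) = (pyChr (66 + i), F[i]'(hi.trans hjlt)) := by
            have h1 : (F.mapIdx (fun i s => (pyChr (66 + i), s)))[i]'(by simp; omega) =
                (as ++ se :: bs)[i]'(by simp; omega) := List.getElem_of_eq hsplit _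
            rw [List.getElem_append_left (by omega)] at h1
            simp only [List.getElem_mapIdx] at h1
            exact h1.symm
          have hnb := hbefore (as[i]'(by omega)) (List.getElem_mem (by omega))
          rw [hasi] at hnb
          simpa using hnb
        have hallf : F.all (fun f => PySem.Set.inter (PySem.Set.ofList k) f == []) = false := by
          rw [List.all_eq_false]
          exact ⟨F[as.length], List.getElem_mem _, by simp [hhit]⟩
        rw [hallf] at hFfin
        simp only [Bool.and_false, Bool.false_eq_true, if_false] at hFfin
        obtain ⟨G, hG⟩ := foldF_prefix t (PySem.Set.update u (PySem.Set.ofList k)) F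
        rw [hG] at hFfin
        have hstep : stepA (d, u, sym, 66 + F.length) k =
            (d.insert k se.1, PySem.Set.update u (PySem.Set.ofList k), sym, 66 + F.length) := by
          simp only [stepA]; rw [if_neg hs, hf]
        have hlab : pvLabelB Ffin (PySem.Set.ofList k) u = se.1 := by
          simp only [pvLabelB]
          rw [if_neg hs]
          have hjl : as.length < Ffin.length := by simp [hFfin]; omega
          have hFj : Ffin[as.length]'hjl = F[as.length] := by
            rw [List.getElem_of_eq hFfin]
            rw [List.getElem_append_left hjlt]
          have hbef : ∀ (i : Nat) (h : i < as.length),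
              PySem.Set.inter (PySem.Set.ofList k) (Ffin[i]'(h.trans hjl)) = [] := by
            intro i hilt
            have hFi : Ffin[i]'(hilt.trans hjl) = F[i]'(by omega) := by
              rw [List.getElem_of_eq hFfin]
              rw [List.getElem_append_left (by omega)]
            rw [hFi]
            exact hmin i hilt
          obtain ⟨rest, hr⟩ := hits_first (PySem.Set.ofList k) Ffin 0 as.length hjl
            (by rw [hFj]; exact hhit) hbef
          rw [hr]
          have heq : ((66 : Int) + (0 + (as.length : Int))).toNat = 66 + as.length := by omega
          show pyChr ((66 + (0 + (as.length : Int))).toNat) = se.1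
          rw [heq, hse]
        rw [hstep, hlab]
        exact ih _ _ F sym Ffin hsym (hFfin.trans hG.symm)

theorem classify_atoms_spec : Claim_equal_classify_atoms := by
  intro ll _dom hpre
  unfold Spec_classify_atoms
  unfold Pre_classify_atoms at hpre
  simp only [classify_atoms, classify_atoms_alt]
  have hkne : ll.map (fun atom => PySem.List.sorted atom (fun x => x) false) ≠ [] := by
    simpa using hpre
  generalize hkeys : ll.map (fun atom => PySem.List.sorted atom (fun x => x) false) = keys at *
  set dA := (PySem.List.enumerate keys).foldl (fun d p => d.modify p.2 [] (fun v => v ++ [p.1]))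
    (PySem.Dict.empty : PySem.Dict (List String) (List Int)) with hdA
  have hkeysA : dA.keys = PySem.Set.ofList keys := by
    rw [hdA, PySem.Dict.keys_foldl_modify_key]
    simp [PySem.Set.update, PySem.Set.ofList_eq_foldl, PySem.List.map_snd_enumerate]
  have hnodup : dA.keys.Nodup := by
    rw [hdA]
    exact PySem.Dict.nodup_keys_foldl_modify_key _ _ _ _ _ (by simp)
  have hcount : ∀ c, (dA.getD c []).length = keys.count c := by
    intro c
    have hswap : dA = ((PySem.List.enumerate keys).map Prod.swap).foldl
        (fun d p => d.modify p.1 [] (fun v => v ++ [p.2])) PySem.Dict.empty := by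
      rw [hdA, List.foldl_map]
      rfl
    rw [hswap, PySem.Dict.getD_foldl_modify_append, List.filter_map, List.map_map]
    simp only [PySem.Dict.getD_empty, List.nil_append, List.length_map]
    have hc : keys.count c = List.countP (fun p : Int × List String => p.2 == c) (PySem.List.enumerate keys) := by
      conv_lhs => rw [← PySem.List.map_snd_enumerate keys 0]
      rw [List.count_eq_countP, List.countP_map]
      rfl
    rw [hc, ← List.countP_eq_length_filter]
    rfl
  have hitems : dA.items = (PySem.Set.ofList keys).map (fun c => (c, dA.getD c [])) := by
    rw [← hkeysA]
    exact PySem.Dict.items_eq_map_keys dA hnodup []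
  have hsorted : PySem.List.sorted dA.items (fun x => ((x.2.length : Int))) true
      = (PySem.List.sorted (PySem.Set.ofList keys)
          (fun c => ((dA.getD c []).length : Int)) true).map (fun c => (c, dA.getD c [])) := by
    rw [hitems, sorted_map_rev]
  have horderB : PySem.List.sorted (PySem.Dict.counter keys).keys
      (fun k => (PySem.Dict.counter keys).getD k 0) true
      = PySem.List.sorted (PySem.Set.ofList keys)
          (fun c => ((dA.getD c []).length : Int)) true := by
    rw [PySem.Dict.keys_counter]
    congr 1
    funext c
    rw [PySem.Dict.getD_counter, hcount]
  have hie : keys.isEmpty = false := by simp [hkne]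
  rw [hsorted, horderB, hie]
  simp only [Bool.false_eq_true, if_false]
  rcases horder : PySem.List.sorted (PySem.Set.ofList keys)
      (fun c => ((dA.getD c []).length : Int)) true with _ | ⟨k0, rest⟩
  · exfalso
    rw [PySem.List.sorted_eq_nil_iff] at horder
    obtain ⟨k1, tl, rfl⟩ := List.exists_cons_of_ne_nil hkne
    have hmem : k1 ∈ PySem.Set.ofList (k1 :: tl) := (PySem.Set.mem_ofList _ _).mpr (by simp)
    rw [horder] at hmem
    exact absurd hmem (List.not_mem_nil)
  · simp only [List.map_cons]
    have hfold : ∀ X : StA,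
        ((rest.map (fun c => (c, dA.getD c []))).foldl (fun st kp => stepA st kp.1) X)
          = rest.foldl stepA X := by
      intro X
      rw [List.foldl_map]
    rw [hfold]
    rw [prefix_fold]
    simp only [List.nil_append, prefixScan, List.drop_succ_cons, List.drop_zero]
    have hu0 : PySem.Set.update PySem.Set.empty (PySem.Set.ofList k0) = PySem.Set.ofList k0 := by
      show PySem.Set.update [] (PySem.Set.ofList k0) = PySem.Set.ofList k0
      rw [PySem.Set.update_nil_left, ofList_nodup_self (PySem.Set.nodup_ofList k0)]
    rw [hu0, founders_fold, classified_fold]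
    have hmain := mainA rest
      ((PySem.Dict.empty : PySem.Dict (List String) String).insert k0 "A")
      (PySem.Set.ofList k0) [] PySem.Dict.empty
      (foldF (PySem.Set.ofList k0) [] rest) (by rfl) rfl
    simp only [List.length_nil, Nat.add_zero] at hmain
    rw [hmain]
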